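-- pv_equiv track=rewrite | github.com/armeizir/erm | risk/views.py | _resolve_level_bucket
-- ===== SOURCE A (Python) =====
-- LEVEL_FALLBACKS = [
--     {"name": "Low", "codes": ["LOW"], "default_color": "#5b8f3a"},
--     {"name": "Low to Moderate", "codes": ["LOW_TO_MODERATE", "LOW-MODERATE", "LTM"], "default_color": "#b8d4a2"},
--     {"name": "Moderate", "codes": ["MODERATE", "MEDIUM"], "default_color": "#f3ef19"},
--     {"name": "Moderate to High", "codes": ["MODERATE_TO_HIGH", "MODERATE-HIGH", "MTH"], "default_color": "#f2b01e"},
--     {"name": "High", "codes": ["HIGH"], "default_color": "#d50f0f"},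
-- ]
--
-- def _normalize(text):
--     return (text or "").strip().lower()
--
-- def _resolve_level_bucket(level_name):
--     normalized = _normalize(level_name)
--     for bucket in LEVEL_FALLBACKS:
--         if _normalize(bucket["name"]) == normalized:
--             return bucket["name"]
--     if "high" in normalized and "moderate" in normalized:
--         return "Moderate to High"
--     if "high" in normalized:
--         return "High"
--     if "moderate" in normalized and "low" in normalized:
--         return "Low to Moderate"
--     if "moderate" in normalized:
--         return "Moderate"
--     if "low" in normalized:
--         return "Low"
--     return level_name or "Tidak Terkategori"
-- ===== SOURCE B (Python) =====
-- def _resolve_level_bucket(level_name):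
--     normalized = (level_name or "").strip().lower()
--     has_high = "high" in normalized
--     has_moderate = "moderate" in normalized
--     has_low = "low" in normalized
--     if has_high:
--         return "Moderate to High" if has_moderate else "High"
--     if has_moderate:
--         return "Low to Moderate" if has_low else "Moderate"
--     if has_low:
--         return "Low"
--     return level_name or "Tidak Terkategori"
-- ===== Notes on version B (the rewrite author's own statement) =====
-- stated objective: simpler
-- what changed: Dropped the exact-match loop over LEVEL_FALLBACKS (every bucket name is classified identically by the substring tests) and replaced the five-branch substring cascade by three membership booleans with nested branching in the same priority order.
import Mathlib
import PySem

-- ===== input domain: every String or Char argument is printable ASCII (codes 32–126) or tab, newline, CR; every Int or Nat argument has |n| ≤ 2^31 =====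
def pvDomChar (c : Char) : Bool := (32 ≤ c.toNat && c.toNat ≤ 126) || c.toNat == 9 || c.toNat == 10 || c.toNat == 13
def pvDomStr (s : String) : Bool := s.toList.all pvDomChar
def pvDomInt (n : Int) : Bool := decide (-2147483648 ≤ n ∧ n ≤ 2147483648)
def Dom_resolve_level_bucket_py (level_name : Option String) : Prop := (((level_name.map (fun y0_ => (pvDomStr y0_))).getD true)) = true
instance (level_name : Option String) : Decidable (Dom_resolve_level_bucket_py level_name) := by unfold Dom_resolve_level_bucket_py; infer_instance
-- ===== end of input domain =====

-- B drops A's redundant exact-match loop over the fallback table and branches on three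
-- substring booleans in the same priority order (objective: simpler).


-- ===== PORT A =====
-- LEVEL_FALLBACKS : list of (name, codes, default_color)
def pvLevelFallbacks : List (String × List String × String) :=
  [("Low", (["LOW"], "#5b8f3a")),
   ("Low to Moderate", (["LOW_TO_MODERATE", "LOW-MODERATE", "LTM"], "#b8d4a2")),
   ("Moderate", (["MODERATE", "MEDIUM"], "#f3ef19")),
   ("Moderate to High", (["MODERATE_TO_HIGH", "MODERATE-HIGH", "MTH"], "#f2b01e")),
   ("High", (["HIGH"], "#d50f0f"))]

-- _normalize(text) = (text or "").strip().lower()   (None/"" both give "")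
def pvNormalize (text : Option String) : String :=
  PySem.Str.lower (PySem.Str.strip (text.getD ""))

-- the 'for bucket in LEVEL_FALLBACKS' loop with early return
def pvLoopA (buckets : List (String × List String × String)) (normalized : String) :
    Option String :=
  match buckets with
  | [] => none
  | b :: rest =>
      if pvNormalize (some b.1) == normalized then some b.1 else pvLoopA rest normalized

def resolve_level_bucket_py (level_name : Option String) : String :=
  let normalized := pvNormalize level_name
  match pvLoopA pvLevelFallbacks normalized with
  | some name => name
  | none =>
    if PySem.Str.isIn "high" normalized && PySem.Str.isIn "moderate" normalized then
      "Moderate to High"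
    else if PySem.Str.isIn "high" normalized then "High"
    else if PySem.Str.isIn "moderate" normalized && PySem.Str.isIn "low" normalized then
      "Low to Moderate"
    else if PySem.Str.isIn "moderate" normalized then "Moderate"
    else if PySem.Str.isIn "low" normalized then "Low"
    else match level_name with       -- level_name or "Tidak Terkategori"
         | none => "Tidak Terkategori"
         | some s => if s == "" then "Tidak Terkategori" else s

-- ===== PORT B =====
def resolve_level_bucket_py_alt (level_name : Option String) : String :=
  let normalized := PySem.Str.lower (PySem.Str.strip (level_name.getD ""))
  let has_high := PySem.Str.isIn "high" normalized
  let has_moderate := PySem.Str.isIn "moderate" normalized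
  let has_low := PySem.Str.isIn "low" normalized
  if has_high then (if has_moderate then "Moderate to High" else "High")
  else if has_moderate then (if has_low then "Low to Moderate" else "Moderate")
  else if has_low then "Low"
  else match level_name with         -- level_name or "Tidak Terkategori"
       | none => "Tidak Terkategori"
       | some s => if s == "" then "Tidak Terkategori" else s

-- ===== PRECONDITION & SPEC =====
def Spec_resolve_level_bucket_py (level_name : Option String) (out : String) : Prop := out = resolve_level_bucket_py_alt level_name
instance (level_name : Option String) (out : String) : Decidable (Spec_resolve_level_bucket_py level_name out) := by unfold Spec_resolve_level_bucket_py; infer_instance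

-- ===== CLAIM (what is proved, stated in full; the proofs are below) =====
def Claim_equal_resolve_level_bucket_py : Prop := ∀ (level_name : Option String), Dom_resolve_level_bucket_py level_name → Spec_resolve_level_bucket_py level_name (resolve_level_bucket_py level_name)

-- ===== LEMMAS AND PROOFS =====

-- A's exact-match loop over the fallback table, evaluated on the literal table.
lemma loopA_eq (n : String) : pvLoopA pvLevelFallbacks n =
  if "low" == n then some "Low"
  else if "low to moderate" == n then some "Low to Moderate"
  else if "moderate" == n then some "Moderate"
  else if "moderate to high" == n then some "Moderate to High"
  else if "high" == n then some "High"
  else none := by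
  simp only [pvLoopA, pvLevelFallbacks,
    show pvNormalize (some "Low") = "low" from by decide,
    show pvNormalize (some "Low to Moderate") = "low to moderate" from by decide,
    show pvNormalize (some "Moderate") = "moderate" from by decide,
    show pvNormalize (some "Moderate to High") = "moderate to high" from by decide,
    show pvNormalize (some "High") = "high" from by decide]

-- ===== VERDICT (by name: the statement is the Claim_ definition above) =====

theorem resolve_level_bucket_py_spec : Claim_equal_resolve_level_bucket_py := by
  intro ln _
  unfold Spec_resolve_level_bucket_py
  simp only [resolve_level_bucket_py, resolve_level_bucket_py_alt]
  rw [loopA_eq]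
  rw [pvNormalize]
  generalize PySem.Str.lower (PySem.Str.strip (ln.getD "")) = n
  by_cases h1 : ("low" : String) = n
  · subst h1; rfl
  by_cases h2 : ("low to moderate" : String) = n
  · subst h2; rfl
  by_cases h3 : ("moderate" : String) = n
  · subst h3; rfl
  by_cases h4 : ("moderate to high" : String) = n
  · subst h4; rfl
  by_cases h5 : ("high" : String) = n
  · subst h5; rfl
  simp only [beq_iff_eq, if_neg h1, if_neg h2, if_neg h3, if_neg h4, if_neg h5]
  cases hb : PySem.Str.isIn "high" n <;> cases hm : PySem.Str.isIn "moderate" n <;>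
    cases hl : PySem.Str.isIn "low" n <;> simp
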